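-- pv_equiv track=rewrite | github.com/enclaveid/enclaveid | libs/ai-agents/ai_agents/graph_explorer_agent/utils/get_node_datetime.py | get_node_datetime
-- ===== SOURCE A (Python) =====
-- def get_node_datetime(datetimes: list[str]) -> str:
--     # Remove nulls and duplicates
--     datetimes = [d for d in datetimes if d is not None]
--     datetimes = list(set(datetimes))
--
--     if len(datetimes) == 0:
--         return "Unknown"
--
--     if len(datetimes) == 1:
--         return datetimes[0]
--     else:
--         sorted_datetimes = sorted(datetimes)
--         return f"from {sorted_datetimes[0]} to {sorted_datetimes[-1]}"
-- ===== SOURCE B (Python) =====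
-- def get_node_datetime(datetimes: list[str]) -> str:
--     vals = [d for d in datetimes if d is not None]
--     if not vals:
--         return "Unknown"
--     lo = min(vals)
--     hi = max(vals)
--     return lo if lo == hi else f"from {lo} to {hi}"
-- ===== Notes on version B (the rewrite author's own statement) =====
-- stated objective: simpler
-- what changed: Replaces A's set deduplication, full sort and len==0/len==1 branching with a single filter, an emptiness test, min and max, and a lo == hi value comparison.
import Mathlib
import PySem

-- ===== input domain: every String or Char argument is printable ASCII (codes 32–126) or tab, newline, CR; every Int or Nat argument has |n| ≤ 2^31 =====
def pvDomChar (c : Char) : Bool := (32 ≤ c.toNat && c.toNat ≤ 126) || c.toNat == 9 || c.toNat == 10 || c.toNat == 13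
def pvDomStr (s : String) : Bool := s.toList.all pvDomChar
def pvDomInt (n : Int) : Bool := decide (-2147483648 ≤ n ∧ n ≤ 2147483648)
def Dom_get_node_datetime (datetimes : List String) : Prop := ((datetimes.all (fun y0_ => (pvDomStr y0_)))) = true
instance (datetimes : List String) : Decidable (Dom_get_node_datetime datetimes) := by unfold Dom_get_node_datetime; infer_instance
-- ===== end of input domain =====

-- B replaces A's set-dedup + full sort + len-based branching by a single filter plus min/max
-- with a lo == hi value test (objective: simpler).


-- ===== PORT A =====
def get_node_datetime (datetimes : List String) : String :=
  -- [d for d in datetimes if d is not None]: a str is never None, so the test keeps every element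
  let dts0 := datetimes.filter (fun _ => true)
  -- list(set(datetimes)); only its length, membership and sorted order are consumed below,
  -- so the (unmodelled) hash iteration order cannot affect the result
  let dts : List String := PySem.Set.ofList dts0
  if dts.length = 0 then "Unknown"
  else if dts.length = 1 then
    (PySem.List.pyGet? dts 0).getD ""  -- index 0 of a nonempty list: Python never raises here
  else
    let sorted_dts := PySem.List.sorted dts (fun x => x) false
    "from " ++ (PySem.List.pyGet? sorted_dts 0).getD "" ++ " to " ++
      (PySem.List.pyGet? sorted_dts (-1)).getD ""

-- ===== PORT B =====
def get_node_datetime_alt (datetimes : List String) : String :=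
  let vals := datetimes.filter (fun _ => true)  -- 'd is not None' keeps every str
  if vals = [] then "Unknown"
  else
    let lo := (PySem.List.min? vals (fun y => y)).getD ""  -- min(vals), vals nonempty
    let hi := (PySem.List.max? vals (fun y => y)).getD ""  -- max(vals)
    if lo = hi then lo else "from " ++ lo ++ " to " ++ hi

-- ===== PRECONDITION & SPEC =====
def Spec_get_node_datetime (datetimes : List String) (out : String) : Prop := out = get_node_datetime_alt datetimes
instance (datetimes : List String) (out : String) : Decidable (Spec_get_node_datetime datetimes out) := by unfold Spec_get_node_datetime; infer_instance

-- ===== CLAIM (what is proved, stated in full; the proofs are below) =====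
def Claim_equal_get_node_datetime : Prop := ∀ (datetimes : List String), Dom_get_node_datetime datetimes → Spec_get_node_datetime datetimes (get_node_datetime datetimes)

-- ===== LEMMAS AND PROOFS =====

-- Set.add never shrinks a list, so folding it over anything keeps it nonempty.
theorem pv_foldl_add_ne_nil (t : List String) (s : List String) (hs : s ≠ []) :
    t.foldl PySem.Set.add s ≠ [] := by
  induction t generalizing s with
  | nil => exact hs
  | cons x r ih =>
      simp only [List.foldl_cons]
      apply ih
      unfold PySem.Set.add
      split
      · exact hs
      · simp

theorem pv_ofList_eq_nil_iff (xs : List String) : PySem.Set.ofList xs = [] ↔ xs = [] := by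
  constructor
  · intro h
    cases xs with
    | nil => rfl
    | cons x t =>
        exfalso
        rw [PySem.Set.ofList_eq_foldl] at h
        simp only [List.foldl_cons] at h
        exact pv_foldl_add_ne_nil t (PySem.Set.add [] x) (by simp [PySem.Set.add]) h
  · intro h; subst h; rfl

-- the first element of sorted s is the minimum of xs when s = set(xs)
theorem pv_sorted_head_eq_min (xs : List String) (m : String)
    (hm : PySem.List.min? xs (fun y => y) = some m)
    (hlen : 0 < (PySem.List.sorted (PySem.Set.ofList xs) (fun x => x) false).length) :
    (PySem.List.sorted (PySem.Set.ofList xs) (fun x => x) false)[0] = m := by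
  set srt := PySem.List.sorted (PySem.Set.ofList xs) (fun x => x) false with hsrt
  have hperm := PySem.List.sorted_perm (PySem.Set.ofList xs) (fun x : String => x) false
  have h0mem : srt[0] ∈ xs := by
    have : srt[0] ∈ srt := List.getElem_mem hlen
    rw [← PySem.Set.mem_ofList]
    exact hperm.mem_iff.mp this
  have hle : m ≤ srt[0] := PySem.List.min?_isMin hm _ h0mem
  have hmmem : m ∈ srt := by
    rw [hperm.mem_iff, PySem.Set.mem_ofList]
    exact PySem.List.min?_mem hm
  obtain ⟨i, hi, hieq⟩ := List.getElem_of_mem hmmem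
  have hge : srt[0] ≤ m := by
    rw [← hieq]
    exact PySem.List.sorted_id_getElem_mono _ (Nat.zero_le i) hi
  exact le_antisymm hge hle

-- the last element of sorted s is the maximum of xs
theorem pv_sorted_last_eq_max (xs : List String) (M : String)
    (hM : PySem.List.max? xs (fun y => y) = some M)
    (hlen : 0 < (PySem.List.sorted (PySem.Set.ofList xs) (fun x => x) false).length) :
    (PySem.List.sorted (PySem.Set.ofList xs) (fun x => x) false)[(PySem.List.sorted (PySem.Set.ofList xs) (fun x => x) false).length - 1]'(by omega) = M := by
  set srt := PySem.List.sorted (PySem.Set.ofList xs) (fun x => x) false with hsrt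
  have hperm := PySem.List.sorted_perm (PySem.Set.ofList xs) (fun x : String => x) false
  have hLmem : srt[srt.length - 1]'(by omega) ∈ xs := by
    have : srt[srt.length - 1]'(by omega) ∈ srt := List.getElem_mem (by omega)
    rw [← PySem.Set.mem_ofList]
    exact hperm.mem_iff.mp this
  have hle : srt[srt.length - 1]'(by omega) ≤ M := PySem.List.max?_isMax hM _ hLmem
  have hMmem : M ∈ srt := by
    rw [hperm.mem_iff, PySem.Set.mem_ofList]
    exact PySem.List.max?_mem hM
  obtain ⟨i, hi, hieq⟩ := List.getElem_of_mem hMmem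
  have hge : M ≤ srt[srt.length - 1]'(by omega) := by
    rw [← hieq]
    have hi2 : i ≤ srt.length - 1 := by omega
    have hq2 : srt.length - 1 < srt.length := by omega
    exact PySem.List.sorted_id_getElem_mono _ hi2 hq2
  exact le_antisymm hle hge

-- ===== VERDICT (by name: the statement is the Claim_ definition above) =====
theorem get_node_datetime_spec : Claim_equal_get_node_datetime := by
  intro xs _
  unfold Spec_get_node_datetime get_node_datetime get_node_datetime_alt
  simp only [List.filter_true]
  by_cases hnil : xs = []
  · subst hnil; rfl
  · -- xs nonempty: set is nonempty, min/max exist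
    have hsne : PySem.Set.ofList xs ≠ [] := fun h => hnil ((pv_ofList_eq_nil_iff xs).mp h)
    obtain ⟨m, hm⟩ : ∃ m, PySem.List.min? xs (fun y => y) = some m := by
      cases h : PySem.List.min? xs (fun y => y) with
      | none => exact absurd ((PySem.List.min?_eq_none_iff xs _).mp h) hnil
      | some m => exact ⟨m, rfl⟩
    obtain ⟨M, hM⟩ : ∃ M, PySem.List.max? xs (fun y => y) = some M := by
      cases h : PySem.List.max? xs (fun y => y) with
      | none => exact absurd ((PySem.List.max?_eq_none_iff xs _).mp h) hnil
      | some M => exact ⟨M, rfl⟩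
    have hmle : ∀ y ∈ xs, m ≤ y := PySem.List.min?_isMin hm
    have hMge : ∀ y ∈ xs, y ≤ M := PySem.List.max?_isMax hM
    simp only [hnil, hm, hM, Option.getD_some]
    set s := PySem.Set.ofList xs with hs
    have hslen : 0 < s.length := List.length_pos_iff.mpr hsne
    by_cases h1 : s.length = 1
    · -- singleton set: every element of xs equals a, so lo = hi = a and A returns a
      obtain ⟨a, ha⟩ : ∃ a, s = [a] := List.length_eq_one_iff.mp h1
      have hall : ∀ y ∈ xs, y = a := by
        intro y hy
        have : y ∈ s := (PySem.Set.mem_ofList xs y).mpr hy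
        rw [ha] at this; simpa using this
      have hma : m = a := hall m (PySem.List.min?_mem hm)
      have hMa : M = a := hall M (PySem.List.max?_mem hM)
      rw [ha]
      simp [PySem.List.pyGet?, PySem.List.pyIdx?, hma, hMa]
    · -- at least two distinct values: lo ≠ hi, A formats head/last of the sorted set
      have h2 : 2 ≤ s.length := by omega
      have hslen0 : ¬ s.length = 0 := by omega
      simp only [hslen0, if_false, h1, if_false]
      set srt := PySem.List.sorted s (fun x => x) false with hsrt
      have hperm := PySem.List.sorted_perm s (fun x : String => x) false
      have hsrtlen : srt.length = s.length := hperm.length_eq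
      have hsrtpos : 0 < srt.length := by omega
      have hhead := pv_sorted_head_eq_min xs m hm (by rw [← hs] at *; exact hsrtpos)
      have hlast := pv_sorted_last_eq_max xs M hM (by rw [← hs] at *; exact hsrtpos)
      -- m ≠ M because s contains two distinct elements of xs
      have hmM : m ≠ M := by
        intro heq
        obtain ⟨a, b, r, hab⟩ : ∃ a b r, s = a :: b :: r := by
          match hsv : s, h2 with
          | a :: b :: r, _ => exact ⟨a, b, r, rfl⟩
        have hnd := PySem.Set.nodup_ofList xs
        rw [← hs, hab] at hnd
        have hane : a ≠ b := by simp at hnd; exact hnd.1.1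
        have hax : a ∈ xs := (PySem.Set.mem_ofList xs a).mp (by rw [← hs, hab]; simp)
        have hbx : b ∈ xs := (PySem.Set.mem_ofList xs b).mp (by rw [← hs, hab]; simp)
        have : a = m := le_antisymm (heq ▸ hMge a hax) (hmle a hax)
        have hb : b = m := le_antisymm (heq ▸ hMge b hbx) (hmle b hbx)
        exact hane (this.trans hb.symm)
      simp only [hmM, if_false]
      -- evaluate the two pyGet? calls
      have hg0 : PySem.List.pyGet? srt 0 = some srt[0] := by
        have := PySem.List.pyGet?_natCast srt 0
        simpa [List.getElem?_eq_getElem hsrtpos] using this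
      have hgL : PySem.List.pyGet? srt (-1) = some (srt[srt.length - 1]'(by omega)) := by
        simp only [PySem.List.pyGet?, PySem.List.pyIdx?]
        norm_num
        rw [if_pos (show 1 ≤ srt.length by omega)]
        simp [List.getElem?_eq_getElem (show srt.length - 1 < srt.length by omega)]
      rw [hg0, hgL, Option.getD_some, Option.getD_some, hhead, hlast]
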